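-- pv_equiv track=rewrite | github.com/NeilMitra/FPGA-Accelerated-Drug-Discovery-and-Development | fpga_eri_simulator.py | _count_quartets
-- ===== SOURCE A (Python) =====
-- def _count_quartets(n_basis: int) -> int:
--     """Count unique ERI quartets using 8-fold symmetry."""
--     count = 0
--     for i in range(n_basis):
--         for j in range(i + 1):
--             for k in range(n_basis):
--                 for l in range(k + 1):
--                     if i * (i + 1) // 2 + j >= k * (k + 1) // 2 + l:
--                         count += 1
--     return count
-- ===== SOURCE B (Python) =====
-- def _count_quartets(n_basis: int) -> int:
--     if n_basis <= 0:
--         return 0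
--     m = n_basis * (n_basis + 1) // 2
--     return m * (m + 1) // 2
-- ===== Notes on version B (the rewrite author's own statement) =====
-- stated objective: faster
-- what changed: Replaced the quadruple nested loop counting pair-index comparisons with the closed form: m = n(n+1)/2 canonical (i,j) pairs, answer m(m+1)/2.
import Mathlib
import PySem

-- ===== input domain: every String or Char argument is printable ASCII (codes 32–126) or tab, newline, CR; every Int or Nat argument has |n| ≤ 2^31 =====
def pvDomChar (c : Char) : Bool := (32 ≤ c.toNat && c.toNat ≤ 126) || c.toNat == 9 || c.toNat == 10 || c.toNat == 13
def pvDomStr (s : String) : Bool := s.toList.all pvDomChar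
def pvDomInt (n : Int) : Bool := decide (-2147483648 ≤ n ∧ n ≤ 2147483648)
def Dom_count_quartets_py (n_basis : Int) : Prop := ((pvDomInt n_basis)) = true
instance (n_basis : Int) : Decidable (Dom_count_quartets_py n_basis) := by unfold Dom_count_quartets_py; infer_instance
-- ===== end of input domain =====

-- B replaces A's O(n^4) quadruple loop by the O(1) closed form m(m+1)/2 with m = n(n+1)/2.

-- ===== PORT A =====
def count_quartets_py (n_basis : Int) : Int :=
  (PySem.List.pyRange 0 n_basis 1).foldl (fun count i =>
    (PySem.List.pyRange 0 (i+1) 1).foldl (fun count j =>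
      (PySem.List.pyRange 0 n_basis 1).foldl (fun count k =>
        (PySem.List.pyRange 0 (k+1) 1).foldl (fun count l =>
          if PySem.Int.floordiv (i*(i+1)) 2 + j ≥ PySem.Int.floordiv (k*(k+1)) 2 + l
          then count + 1 else count) count) count) count) 0

-- ===== PORT B =====
def count_quartets_py_alt (n_basis : Int) : Int :=
  if n_basis ≤ 0 then 0
  else
    let m := PySem.Int.floordiv (n_basis * (n_basis + 1)) 2
    PySem.Int.floordiv (m * (m + 1)) 2

-- ===== PRECONDITION & SPEC =====
def Spec_count_quartets_py (n_basis : Int) (out : Int) : Prop := out = count_quartets_py_alt n_basis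
instance (n_basis : Int) (out : Int) : Decidable (Spec_count_quartets_py n_basis out) := by unfold Spec_count_quartets_py; infer_instance

-- ===== CLAIM (what is proved, stated in full; the proofs are below) =====
def Claim_equal_count_quartets_py : Prop := ∀ (n_basis : Int), Dom_count_quartets_py n_basis → Spec_count_quartets_py n_basis (count_quartets_py n_basis)

-- ===== LEMMAS AND PROOFS =====

/-- Triangular numbers, the invariant shape of both programs. -/
def tri : Nat → Nat
  | 0 => 0
  | n + 1 => tri n + (n + 1)

theorem two_tri (n : Nat) : 2 * tri n = n * (n + 1) := by
  induction n with
  | zero => rfl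
  | succ n ih => simp only [tri]; ring_nf; ring_nf at ih; omega

theorem tri_mono {a b : Nat} (h : a ≤ b) : tri a ≤ tri b := by
  induction h with
  | refl => exact le_rfl
  | step _ ih => exact le_trans ih (Nat.le_add_right _ _)

theorem tri_add (a b : Nat) : tri (a + b) = tri a + b * a + tri b := by
  induction b with
  | zero => simp [tri]
  | succ b ih =>
    have : a + (b + 1) = (a + b) + 1 := by omega
    rw [this]
    show tri (a + b) + (a + b + 1) = tri a + (b+1) * a + (tri b + (b + 1))
    rw [ih]; ring

/-- `⌊n(n+1)/2⌋ = tri n` on casts of naturals. -/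
theorem fd_tri (n : Nat) : PySem.Int.floordiv ((n : Int) * ((n : Int) + 1)) 2 = (tri n : Int) := by
  rw [PySem.Int.floordiv_eq_ediv_of_pos (by omega)]
  have h : ((2 * tri n : Nat) : Int) = ((n * (n + 1) : Nat) : Int) := by rw [two_tri]
  have h2 : (n : Int) * ((n : Int) + 1) = 2 * (tri n : Int) := by push_cast at h; linarith
  rw [h2]
  omega

/-- Innermost `l` loop: counts `l ∈ [0,m)` with `C + l ≤ T`. -/
theorem l_loop (T C c : Int) (m : Nat) :
    (PySem.List.pyRange 0 (m : Int) 1).foldl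
      (fun count l => if T ≥ C + l then count + 1 else count) c
    = c + min (max (T - C + 1) 0) (m : Int) := by
  induction m generalizing c with
  | zero => simp [PySem.List.pyRange_one_eq_nil]
  | succ m ih =>
    have : ((m + 1 : Nat) : Int) = (m : Int) + 1 := by push_cast; ring
    rw [this, PySem.List.pyRange_one_succ_right (by positivity), List.foldl_append, ih]
    simp only [List.foldl_cons, List.foldl_nil]
    split_ifs with h <;> omega

/-- The `k`/`l` double loop: counts canonical pairs with index ≤ T; value `min(T+1, tri n)` (clamped at 0). -/
theorem kl_loop (T c : Int) (n : Nat) :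
    (PySem.List.pyRange 0 (n : Int) 1).foldl (fun count k =>
      (PySem.List.pyRange 0 (k+1) 1).foldl (fun count l =>
        if T ≥ PySem.Int.floordiv (k*(k+1)) 2 + l then count + 1 else count) count) c
    = c + min (max (T + 1) 0) (tri n : Int) := by
  induction n generalizing c with
  | zero => simp [PySem.List.pyRange_one_eq_nil, tri]
  | succ n ih =>
    have hc : ((n + 1 : Nat) : Int) = (n : Int) + 1 := by push_cast; ring
    rw [hc, PySem.List.pyRange_one_succ_right (by positivity), List.foldl_append, ih]
    simp only [List.foldl_cons, List.foldl_nil]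
    rw [← hc, l_loop]
    have hfd : PySem.Int.floordiv ((n : Int) * (((n+1 : Nat)) : Int)) 2 = (tri n : Int) := by
      exact_mod_cast fd_tri n
    rw [hfd]
    have h1 : (tri (n+1) : Int) = (tri n : Int) + (n : Int) + 1 := by
      show ((tri n + (n+1) : Nat) : Int) = _
      push_cast; ring
    omega

/-- The `j` loop at fixed pair-index offset `C`, bound never reached while `C + m ≤ tri N`. -/
theorem j_loop (N : Nat) (C c : Int) (m : Nat) (hC : 0 ≤ C)
    (hb : C + (m : Int) ≤ (tri N : Int)) :
    (PySem.List.pyRange 0 (m : Int) 1).foldl (fun count j =>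
      (PySem.List.pyRange 0 (N : Int) 1).foldl (fun count k =>
        (PySem.List.pyRange 0 (k+1) 1).foldl (fun count l =>
          if C + j ≥ PySem.Int.floordiv (k*(k+1)) 2 + l then count + 1 else count) count) count) c
    = c + (m : Int) * C + (tri m : Int) := by
  induction m generalizing c with
  | zero => simp [PySem.List.pyRange_one_eq_nil, tri]
  | succ m ih =>
    have hc : ((m + 1 : Nat) : Int) = (m : Int) + 1 := by push_cast; ring
    rw [hc, PySem.List.pyRange_one_succ_right (by positivity), List.foldl_append,
      ih c (by push_cast at hb; omega)]
    simp only [List.foldl_cons, List.foldl_nil]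
    rw [kl_loop]
    have h1 : (tri (m+1) : Int) = (tri m : Int) + (m : Int) + 1 := by
      show ((tri m + (m+1) : Nat) : Int) = _
      push_cast; ring
    have hmin : min (max (C + (m : Int) + 1) 0) (tri N : Int) = C + (m : Int) + 1 := by
      push_cast at hb; omega
    rw [hmin, h1]; ring

/-- The full outer loop over `i < n` (with inner bound `N`, `n ≤ N`) totals `tri (tri n)`. -/
theorem i_loop (N n : Nat) (h : n ≤ N) (c : Int) :
    (PySem.List.pyRange 0 (n : Int) 1).foldl (fun count i =>
      (PySem.List.pyRange 0 (i+1) 1).foldl (fun count j =>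
        (PySem.List.pyRange 0 (N : Int) 1).foldl (fun count k =>
          (PySem.List.pyRange 0 (k+1) 1).foldl (fun count l =>
            if PySem.Int.floordiv (i*(i+1)) 2 + j ≥ PySem.Int.floordiv (k*(k+1)) 2 + l
            then count + 1 else count) count) count) count) c
    = c + (tri (tri n) : Int) := by
  induction n generalizing c with
  | zero => simp [PySem.List.pyRange_one_eq_nil, tri]
  | succ n ih =>
    have hc : ((n + 1 : Nat) : Int) = (n : Int) + 1 := by push_cast; ring
    rw [hc, PySem.List.pyRange_one_succ_right (by positivity), List.foldl_append, ih (by omega) c]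
    simp only [List.foldl_cons, List.foldl_nil]
    rw [fd_tri]
    have hmono : tri (n+1) ≤ tri N := tri_mono h
    have htn : tri n + (n+1) ≤ tri N := by
      have e : tri (n+1) = tri n + (n+1) := rfl
      omega
    have hb : (tri n : Int) + ((n+1 : Nat) : Int) ≤ (tri N : Int) := by exact_mod_cast htn
    rw [← hc, j_loop N _ _ (n+1) (by positivity) hb]
    have h2 : tri (tri (n+1)) = tri (tri n) + (n+1) * tri n + tri (n+1) := by
      have e : tri (n+1) = tri n + (n+1) := rfl
      rw [e, tri_add]; omega
    rw [h2]; push_cast; ring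

-- ===== VERDICT (by name: the statement is the Claim_ definition above) =====
theorem count_quartets_py_spec : Claim_equal_count_quartets_py := by
  intro n _
  unfold Spec_count_quartets_py count_quartets_py count_quartets_py_alt
  by_cases hn : n ≤ 0
  · simp [hn, PySem.List.pyRange_one_eq_nil]
  · have hpos : 0 < n := by omega
    have hcast : n = ((n.toNat : Nat) : Int) := by omega
    rw [if_neg hn]
    conv_lhs => rw [hcast]
    rw [i_loop n.toNat n.toNat le_rfl 0]
    conv_rhs => rw [hcast]
    rw [fd_tri, fd_tri]
    simp
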